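-- pv_equiv track=rewrite | github.com/Suchy702/Szachy | events.py | where_clik
-- ===== SOURCE A (Python) =====
-- def where_clik(pos):
--     y_up, y_down = 0, 75
--     for y in range(8):
--         x_left, x_right = 0, 75
--         for x in range(8):
--             if y_up <= pos[0] <= y_down and x_left <= pos[1] <= x_right:
--                 return x, y
--             x_left += 75
--             x_right += 75
--         y_up += 75
--         y_down += 75
--     return 'Nowhere'
-- ===== SOURCE B (Python) =====
-- def _axis(c):
--     """Closed-form board index for one coordinate, None if off the board."""
--     if c < 0 or c > 600:
--         return None
--     return -(-c // 75) - 1 if c else 0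
--
--
-- def where_clik(pos):
--     y = _axis(pos[0])
--     x = _axis(pos[1])
--     if y is None or x is None:
--         return 'Nowhere'
--     return x, y
-- ===== Notes on version B (the rewrite author's own statement) =====
-- stated objective: simpler
-- what changed: Replaces the 8x8 nested scan for the containing cell with a closed-form per-axis index (ceiling division, boundary ties to the lower index), applied once to each coordinate.
-- outside the precondition, e.g. on where_clik((601, 0)): A returns 'Nowhere', B returns 'Nowhere'; on where_clik((-1, 300)): A returns 'Nowhere', B returns 'Nowhere'
import Mathlib
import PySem

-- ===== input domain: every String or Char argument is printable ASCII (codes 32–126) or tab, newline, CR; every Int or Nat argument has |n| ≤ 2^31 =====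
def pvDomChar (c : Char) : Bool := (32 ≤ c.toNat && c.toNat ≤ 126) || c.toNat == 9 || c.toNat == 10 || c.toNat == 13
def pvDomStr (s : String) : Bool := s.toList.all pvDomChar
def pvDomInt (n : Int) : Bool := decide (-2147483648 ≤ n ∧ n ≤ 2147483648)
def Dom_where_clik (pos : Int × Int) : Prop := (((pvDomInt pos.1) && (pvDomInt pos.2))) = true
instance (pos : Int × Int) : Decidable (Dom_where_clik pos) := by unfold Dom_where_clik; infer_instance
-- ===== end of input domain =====

-- B replaces A's 8x8 nested scan with a closed-form per-axis index (simpler).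

-- ===== PORT A =====
-- inner 'for x in range(8)' with state (x_left, x_right); early return becomes Option
def whereClikInner (p0 p1 yUp yDown y : Int) : List Int → Int → Int → Option (Int × Int)
  | [], _, _ => none
  | x :: xs, xl, xr =>
    if (yUp ≤ p0 ∧ p0 ≤ yDown) ∧ (xl ≤ p1 ∧ p1 ≤ xr) then some (x, y)
    else whereClikInner p0 p1 yUp yDown y xs (xl + 75) (xr + 75)

-- outer 'for y in range(8)' with state (y_up, y_down)
def whereClikOuter (p0 p1 : Int) : List Int → Int → Int → Option (Int × Int)
  | [], _, _ => none
  | y :: ys, yUp, yDown =>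
    match whereClikInner p0 p1 yUp yDown y (PySem.List.pyRange 0 8 1) 0 75 with
    | some r => some r
    | none => whereClikOuter p0 p1 ys (yUp + 75) (yDown + 75)

def where_clik (pos : Int × Int) : Int × Int :=
  -- A returns the string 'Nowhere' off the board; those inputs are excluded by Pre_,
  -- so the .getD default is never reached under the claim.
  (whereClikOuter pos.1 pos.2 (PySem.List.pyRange 0 8 1) 0 75).getD (0, 0)

-- ===== PORT B =====
def whereClikAxis (c : Int) : Option Int :=
  if c < 0 ∨ 600 < c then none
  else if c ≠ 0 then some (-(PySem.Int.floordiv (-c) 75) - 1) else some 0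

def where_clik_alt (pos : Int × Int) : Int × Int :=
  match whereClikAxis pos.1, whereClikAxis pos.2 with
  | some y, some x => (x, y)
  | _, _ => (0, 0)   -- Source B returns 'Nowhere' here; excluded by Pre_

-- ===== PRECONDITION & SPEC =====
-- Pre_ excludes positions off the 600x600 board, where A returns the string
-- 'Nowhere' instead of a pair of ints (not a value of the declared type).
def Pre_where_clik (pos : Int × Int) : Prop :=
  0 ≤ pos.1 ∧ pos.1 ≤ 600 ∧ 0 ≤ pos.2 ∧ pos.2 ≤ 600
instance (pos : Int × Int) : Decidable (Pre_where_clik pos) := by unfold Pre_where_clik; infer_instance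

def pvWitness_where_clik : (Int × Int) := (100, 300)

def Spec_where_clik (pos : Int × Int) (out : Int × Int) : Prop := out = where_clik_alt pos
instance (pos : Int × Int) (out : Int × Int) : Decidable (Spec_where_clik pos out) := by unfold Spec_where_clik; infer_instance

-- ===== CLAIM (what is proved, stated in full; the proofs are below) =====
def Claim_equal_where_clik : Prop := ∀ (pos : Int × Int), Dom_where_clik pos → Pre_where_clik pos → Spec_where_clik pos (where_clik pos)

-- ===== LEMMAS AND PROOFS =====

-- closed-form cell index with Euclidean division (proof-side mirror of whereClikAxis's value)
def axV (c : Int) : Int := if c = 0 then 0 else -((-c) / 75) - 1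

theorem axis_eq (c : Int) (h0 : 0 ≤ c) (h1 : c ≤ 600) :
    whereClikAxis c = some (axV c) := by
  unfold whereClikAxis axV
  rw [PySem.Int.floordiv_eq_ediv_of_pos (a := -c) (b := 75) (by norm_num)]
  split_ifs <;> first | rfl | omega

theorem axV_bounds (c : Int) (h0 : 0 ≤ c) (h1 : c ≤ 600) :
    0 ≤ axV c ∧ axV c ≤ 7 ∧ c ≤ 75 * axV c + 75 ∧ (axV c = 0 ∨ 75 * axV c < c) := by
  unfold axV; split_ifs <;> omega

theorem pyRange08 : PySem.List.pyRange 0 8 1 = [0, 1, 2, 3, 4, 5, 6, 7] := by decide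

theorem inner_none (p0 p1 yUp yDown y : Int) (h : ¬(yUp ≤ p0 ∧ p0 ≤ yDown)) :
    ∀ xs xl xr, whereClikInner p0 p1 yUp yDown y xs xl xr = none := by
  intro xs
  induction xs with
  | nil => intro xl xr; rfl
  | cons a t ih =>
    intro xl xr
    simp only [whereClikInner]
    rw [if_neg (by tauto)]
    exact ih _ _

theorem inner_found (p0 p1 yUp yDown y : Int) (hband : yUp ≤ p0 ∧ p0 ≤ yDown)
    (h2 : 0 ≤ p1) (h3 : p1 ≤ 600) :
    whereClikInner p0 p1 yUp yDown y [0, 1, 2, 3, 4, 5, 6, 7] 0 75 = some (axV p1, y) := by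
  simp only [whereClikInner]
  split_ifs <;>
    first
      | omega
      | (simp only [axV, Option.some.injEq, Prod.mk.injEq, and_true]
         split_ifs <;> omega)

-- ===== VERDICT (by name: the statement is the Claim_ definition above) =====
theorem where_clik_spec : Claim_equal_where_clik := by
  intro ⟨p0, p1⟩ _ ⟨h0, h1, h2, h3⟩
  dsimp only at h0 h1 h2 h3
  unfold Spec_where_clik where_clik where_clik_alt
  rw [axis_eq p0 h0 h1, axis_eq p1 h2 h3, pyRange08]
  obtain ⟨k, hk, hbk0, hbk7, hup, hlow⟩ : ∃ k, axV p0 = k ∧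
      0 ≤ k ∧ k ≤ 7 ∧ p0 ≤ 75 * k + 75 ∧ (k = 0 ∨ 75 * k < p0) := by
    obtain ⟨a, b, c, d⟩ := axV_bounds p0 h0 h1
    exact ⟨axV p0, rfl, a, b, c, d⟩
  rw [hk]
  simp only [whereClikOuter, pyRange08]
  interval_cases k
  · rw [inner_found p0 p1 (0) (75) 0 (by omega) h2 h3]
    rfl
  · rw [inner_none p0 p1 (0) (75) 0 (by omega),
        inner_found p0 p1 (0 + 75) (75 + 75) 1 (by omega) h2 h3]
    rfl
  · rw [inner_none p0 p1 (0) (75) 0 (by omega),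
        inner_none p0 p1 (0 + 75) (75 + 75) 1 (by omega),
        inner_found p0 p1 (0 + 75 + 75) (75 + 75 + 75) 2 (by omega) h2 h3]
    rfl
  · rw [inner_none p0 p1 (0) (75) 0 (by omega),
        inner_none p0 p1 (0 + 75) (75 + 75) 1 (by omega),
        inner_none p0 p1 (0 + 75 + 75) (75 + 75 + 75) 2 (by omega),
        inner_found p0 p1 (0 + 75 + 75 + 75) (75 + 75 + 75 + 75) 3 (by omega) h2 h3]
    rfl
  · rw [inner_none p0 p1 (0) (75) 0 (by omega),
        inner_none p0 p1 (0 + 75) (75 + 75) 1 (by omega),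
        inner_none p0 p1 (0 + 75 + 75) (75 + 75 + 75) 2 (by omega),
        inner_none p0 p1 (0 + 75 + 75 + 75) (75 + 75 + 75 + 75) 3 (by omega),
        inner_found p0 p1 (0 + 75 + 75 + 75 + 75) (75 + 75 + 75 + 75 + 75) 4 (by omega) h2 h3]
    rfl
  · rw [inner_none p0 p1 (0) (75) 0 (by omega),
        inner_none p0 p1 (0 + 75) (75 + 75) 1 (by omega),
        inner_none p0 p1 (0 + 75 + 75) (75 + 75 + 75) 2 (by omega),
        inner_none p0 p1 (0 + 75 + 75 + 75) (75 + 75 + 75 + 75) 3 (by omega),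
        inner_none p0 p1 (0 + 75 + 75 + 75 + 75) (75 + 75 + 75 + 75 + 75) 4 (by omega),
        inner_found p0 p1 (0 + 75 + 75 + 75 + 75 + 75) (75 + 75 + 75 + 75 + 75 + 75) 5 (by omega) h2 h3]
    rfl
  · rw [inner_none p0 p1 (0) (75) 0 (by omega),
        inner_none p0 p1 (0 + 75) (75 + 75) 1 (by omega),
        inner_none p0 p1 (0 + 75 + 75) (75 + 75 + 75) 2 (by omega),
        inner_none p0 p1 (0 + 75 + 75 + 75) (75 + 75 + 75 + 75) 3 (by omega),
        inner_none p0 p1 (0 + 75 + 75 + 75 + 75) (75 + 75 + 75 + 75 + 75) 4 (by omega),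
        inner_none p0 p1 (0 + 75 + 75 + 75 + 75 + 75) (75 + 75 + 75 + 75 + 75 + 75) 5 (by omega),
        inner_found p0 p1 (0 + 75 + 75 + 75 + 75 + 75 + 75) (75 + 75 + 75 + 75 + 75 + 75 + 75) 6 (by omega) h2 h3]
    rfl
  · rw [inner_none p0 p1 (0) (75) 0 (by omega),
        inner_none p0 p1 (0 + 75) (75 + 75) 1 (by omega),
        inner_none p0 p1 (0 + 75 + 75) (75 + 75 + 75) 2 (by omega),
        inner_none p0 p1 (0 + 75 + 75 + 75) (75 + 75 + 75 + 75) 3 (by omega),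
        inner_none p0 p1 (0 + 75 + 75 + 75 + 75) (75 + 75 + 75 + 75 + 75) 4 (by omega),
        inner_none p0 p1 (0 + 75 + 75 + 75 + 75 + 75) (75 + 75 + 75 + 75 + 75 + 75) 5 (by omega),
        inner_none p0 p1 (0 + 75 + 75 + 75 + 75 + 75 + 75) (75 + 75 + 75 + 75 + 75 + 75 + 75) 6 (by omega),
        inner_found p0 p1 (0 + 75 + 75 + 75 + 75 + 75 + 75 + 75) (75 + 75 + 75 + 75 + 75 + 75 + 75 + 75) 7 (by omega) h2 h3]
    rfl
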